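-- pv_equiv track=rewrite | github.com/RutgerFJ/Advent-of-Code | 2023/Day 11/Day 11.py | manhattan_path
-- ===== SOURCE A (Python) =====
-- def manhattan_path(a, b):
--     x1, y1 = a
--     x2, y2 = b
--     x_diff = x2 - x1
--     y_diff = y2 - y1
--     x_offset = 1 if x_diff > 0 else -1 if x_diff < 0 else 0
--     y_offset = 1 if y_diff > 0 else -1 if y_diff < 0 else 0
--
--     path_coordinates = []
--     while x1 != x2 or y1 != y2:
--         if x1 != x2 and (y1 == y2 or abs(x_diff) <= abs(y_diff)):
--             x1 += x_offset
--         else: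
--             y1 += y_offset
--         path_coordinates.append((x1, y1))
--
--     return path_coordinates
-- ===== SOURCE B (Python) =====
-- def manhattan_path(a, b):
--     (x1, y1), (x2, y2) = a, b
--     sx = 1 if x2 > x1 else -1
--     sy = 1 if y2 > y1 else -1
--     if abs(x2 - x1) <= abs(y2 - y1):
--         return [(x, y1) for x in range(x1 + sx, x2 + sx, sx)] + \
--                [(x2, y) for y in range(y1 + sy, y2 + sy, sy)]
--     return [(x1, y) for y in range(y1 + sy, y2 + sy, sy)] + \
--            [(x, y2) for x in range(x1 + sx, x2 + sx, sx)]
-- ===== Notes on version B (the rewrite author's own statement) =====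
-- stated objective: simpler
-- what changed: A walks the path one step at a time in a while-loop choosing an axis per iteration; B observes the path is an L-shape and emits it as two closed-form range segments (x-segment then y-segment, or the reverse, by the abs(x_diff)<=abs(y_diff) tie-break).
import Mathlib
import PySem

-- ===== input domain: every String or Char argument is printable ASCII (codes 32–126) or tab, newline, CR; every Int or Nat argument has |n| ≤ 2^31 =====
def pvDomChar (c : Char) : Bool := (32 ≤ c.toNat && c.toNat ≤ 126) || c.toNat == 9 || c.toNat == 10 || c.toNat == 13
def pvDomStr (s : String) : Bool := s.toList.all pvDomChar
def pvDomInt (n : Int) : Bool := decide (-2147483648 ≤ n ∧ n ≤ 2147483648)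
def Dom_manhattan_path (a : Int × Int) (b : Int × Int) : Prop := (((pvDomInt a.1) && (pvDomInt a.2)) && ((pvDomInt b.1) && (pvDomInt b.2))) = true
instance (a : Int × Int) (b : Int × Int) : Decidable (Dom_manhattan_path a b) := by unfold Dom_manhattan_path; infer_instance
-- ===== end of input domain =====

-- B replaces A's per-step branching while-loop by two closed-form range segments (L-shaped path); objective: simpler.


-- ===== PORT A =====
-- the while-loop of A; fuel = |x2-x1|+|y2-y1| is exactly the number of iterations
def manhattan_path_loop (x2 y2 xo yo axd ayd : Int) : Nat → Int → Int → List (Int × Int)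
  | 0, _, _ => []
  | Nat.succ n, x1, y1 =>
    if x1 ≠ x2 ∨ y1 ≠ y2 then
      if x1 ≠ x2 ∧ (y1 = y2 ∨ axd ≤ ayd) then
        (x1 + xo, y1) :: manhattan_path_loop x2 y2 xo yo axd ayd n (x1 + xo) y1
      else
        (x1, y1 + yo) :: manhattan_path_loop x2 y2 xo yo axd ayd n x1 (y1 + yo)
    else []

def manhattan_path (a : Int × Int) (b : Int × Int) : List (Int × Int) :=
  let x1 := a.1; let y1 := a.2
  let x2 := b.1; let y2 := b.2
  let x_diff := x2 - x1
  let y_diff := y2 - y1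
  let x_offset : Int := if x_diff > 0 then 1 else if x_diff < 0 then -1 else 0
  let y_offset : Int := if y_diff > 0 then 1 else if y_diff < 0 then -1 else 0
  manhattan_path_loop x2 y2 x_offset y_offset |x_diff| |y_diff| (|x_diff| + |y_diff|).toNat x1 y1

-- ===== PORT B =====
def manhattan_path_alt (a : Int × Int) (b : Int × Int) : List (Int × Int) :=
  let x1 := a.1; let y1 := a.2
  let x2 := b.1; let y2 := b.2
  let sx : Int := if x2 > x1 then 1 else -1
  let sy : Int := if y2 > y1 then 1 else -1
  if |x2 - x1| ≤ |y2 - y1| then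
    (PySem.List.pyRange (x1 + sx) (x2 + sx) sx).map (fun x => (x, y1)) ++
    (PySem.List.pyRange (y1 + sy) (y2 + sy) sy).map (fun y => (x2, y))
  else
    (PySem.List.pyRange (y1 + sy) (y2 + sy) sy).map (fun y => (x1, y)) ++
    (PySem.List.pyRange (x1 + sx) (x2 + sx) sx).map (fun x => (x, y2))

-- ===== PRECONDITION & SPEC =====
def Spec_manhattan_path (a : Int × Int) (b : Int × Int) (out : List (Int × Int)) : Prop := out = manhattan_path_alt a b
instance (a : Int × Int) (b : Int × Int) (out : List (Int × Int)) : Decidable (Spec_manhattan_path a b out) := by unfold Spec_manhattan_path; infer_instance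

-- ===== CLAIM (what is proved, stated in full; the proofs are below) =====
def Claim_equal_manhattan_path : Prop := ∀ (a : Int × Int) (b : Int × Int), Dom_manhattan_path a b → Spec_manhattan_path a b (manhattan_path a b)

-- ===== LEMMAS AND PROOFS =====

-- x-segment, eastward: while the x-step branch fires, the loop emits (x1+1,y1),…,(x2,y1)
theorem loop_x_pos (x2 y2 yo axd ayd y1 : Int) (h : y1 = y2 ∨ axd ≤ ayd) (m : Nat) :
    ∀ (k : Nat) (x1 : Int), x2 = x1 + k →
      manhattan_path_loop x2 y2 1 yo axd ayd (k + m) x1 y1 =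
        (PySem.List.pyRange (x1 + 1) (x2 + 1) 1).map (fun x => (x, y1)) ++
        manhattan_path_loop x2 y2 1 yo axd ayd m x2 y1 := by
  intro k
  induction k with
  | zero =>
    intro x1 hk
    have hx : x2 = x1 := by omega
    subst hx
    rw [PySem.List.pyRange_one_eq_nil (by omega)]
    simp
  | succ k ih =>
    intro x1 hk
    have hne : x1 ≠ x2 := by omega
    have ih' := ih (x1 + 1) (by push_cast at hk ⊢; omega)
    rw [Nat.succ_add]
    rw [show manhattan_path_loop x2 y2 1 yo axd ayd ((k + m) + 1) x1 y1 =
        (x1 + 1, y1) :: manhattan_path_loop x2 y2 1 yo axd ayd (k + m) (x1 + 1) y1 from by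
      simp only [manhattan_path_loop]
      rw [if_pos (Or.inl hne), if_pos ⟨hne, by tauto⟩]]
    rw [PySem.List.pyRange_one_cons (show x1 + 1 < x2 + 1 by omega), ih']
    simp

-- x-segment, westward
theorem loop_x_neg (x2 y2 yo axd ayd y1 : Int) (h : y1 = y2 ∨ axd ≤ ayd) (m : Nat) :
    ∀ (k : Nat) (x1 : Int), x2 = x1 - k →
      manhattan_path_loop x2 y2 (-1) yo axd ayd (k + m) x1 y1 =
        (PySem.List.pyRange (x1 - 1) (x2 - 1) (-1)).map (fun x => (x, y1)) ++
        manhattan_path_loop x2 y2 (-1) yo axd ayd m x2 y1 := by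
  intro k
  induction k with
  | zero =>
    intro x1 hk
    have hx : x2 = x1 := by omega
    subst hx
    rw [PySem.List.pyRange_neg_one_eq_nil (by omega)]
    simp
  | succ k ih =>
    intro x1 hk
    have hne : x1 ≠ x2 := by omega
    have ih' := ih (x1 + -1) (by push_cast at hk ⊢; omega)
    rw [Nat.succ_add]
    rw [show manhattan_path_loop x2 y2 (-1) yo axd ayd ((k + m) + 1) x1 y1 =
        (x1 + -1, y1) :: manhattan_path_loop x2 y2 (-1) yo axd ayd (k + m) (x1 + -1) y1 from by
      simp only [manhattan_path_loop]
      rw [if_pos (Or.inl hne), if_pos ⟨hne, by tauto⟩]]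
    rw [show x1 - 1 = x1 + -1 from by ring]
    rw [PySem.List.pyRange_neg_one_cons (show x2 - 1 < x1 + -1 by omega), ih']
    simp

-- y-segment, northward: while the y-step branch fires, the loop emits (x1,y1+1),…,(x1,y2)
theorem loop_y_pos (x2 y2 xo axd ayd x1 : Int) (h : x1 = x2 ∨ ¬ axd ≤ ayd) (m : Nat) :
    ∀ (k : Nat) (y1 : Int), y2 = y1 + k →
      manhattan_path_loop x2 y2 xo 1 axd ayd (k + m) x1 y1 =
        (PySem.List.pyRange (y1 + 1) (y2 + 1) 1).map (fun y => (x1, y)) ++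
        manhattan_path_loop x2 y2 xo 1 axd ayd m x1 y2 := by
  intro k
  induction k with
  | zero =>
    intro y1 hk
    have hy : y2 = y1 := by omega
    subst hy
    rw [PySem.List.pyRange_one_eq_nil (by omega)]
    simp
  | succ k ih =>
    intro y1 hk
    have hne : y1 ≠ y2 := by omega
    have ih' := ih (y1 + 1) (by push_cast at hk ⊢; omega)
    rw [Nat.succ_add]
    rw [show manhattan_path_loop x2 y2 xo 1 axd ayd ((k + m) + 1) x1 y1 =
        (x1, y1 + 1) :: manhattan_path_loop x2 y2 xo 1 axd ayd (k + m) x1 (y1 + 1) from by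
      simp only [manhattan_path_loop]
      rw [if_pos (Or.inr hne), if_neg (by tauto)]]
    rw [PySem.List.pyRange_one_cons (show y1 + 1 < y2 + 1 by omega), ih']
    simp

-- y-segment, southward
theorem loop_y_neg (x2 y2 xo axd ayd x1 : Int) (h : x1 = x2 ∨ ¬ axd ≤ ayd) (m : Nat) :
    ∀ (k : Nat) (y1 : Int), y2 = y1 - k →
      manhattan_path_loop x2 y2 xo (-1) axd ayd (k + m) x1 y1 =
        (PySem.List.pyRange (y1 - 1) (y2 - 1) (-1)).map (fun y => (x1, y)) ++
        manhattan_path_loop x2 y2 xo (-1) axd ayd m x1 y2 := by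
  intro k
  induction k with
  | zero =>
    intro y1 hk
    have hy : y2 = y1 := by omega
    subst hy
    rw [PySem.List.pyRange_neg_one_eq_nil (by omega)]
    simp
  | succ k ih =>
    intro y1 hk
    have hne : y1 ≠ y2 := by omega
    have ih' := ih (y1 + -1) (by push_cast at hk ⊢; omega)
    rw [Nat.succ_add]
    rw [show manhattan_path_loop x2 y2 xo (-1) axd ayd ((k + m) + 1) x1 y1 =
        (x1, y1 + -1) :: manhattan_path_loop x2 y2 xo (-1) axd ayd (k + m) x1 (y1 + -1) from by
      simp only [manhattan_path_loop]
      rw [if_pos (Or.inr hne), if_neg (by tauto)]]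
    rw [show y1 - 1 = y1 + -1 from by ring]
    rw [PySem.List.pyRange_neg_one_cons (show y2 - 1 < y1 + -1 by omega), ih']
    simp

theorem loop_zero (x2 y2 xo yo axd ayd x1 y1 : Int) :
    manhattan_path_loop x2 y2 xo yo axd ayd 0 x1 y1 = [] := rfl

-- ===== VERDICT (by name: the statement is the Claim_ definition above) =====
theorem manhattan_path_spec : Claim_equal_manhattan_path := by
  intro a b _
  unfold Spec_manhattan_path manhattan_path manhattan_path_alt
  obtain ⟨x1, y1⟩ := a
  obtain ⟨x2, y2⟩ := b
  dsimp only
  by_cases hc : |x2 - x1| ≤ |y2 - y1|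
  · rw [if_pos hc]
    rcases lt_trichotomy x1 x2 with hx | hx | hx
    · rcases lt_trichotomy y1 y2 with hy | hy | hy
      · -- x1 < x2, y1 < y2
        rw [if_pos (show x2 - x1 > 0 from by omega),
            if_pos (show y2 - y1 > 0 from by omega),
            if_pos (show x2 > x1 from hx),
            if_pos (show y2 > y1 from hy)]
        rw [abs_of_pos (show (0:Int) < x2 - x1 from by omega),
            abs_of_pos (show (0:Int) < y2 - y1 from by omega)] at hc ⊢
        rw [show (x2 - x1 + (y2 - y1)).toNat = (x2 - x1).toNat + (y2 - y1).toNat from by omega]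
        rw [loop_x_pos x2 y2 1 (x2 - x1) (y2 - y1) y1 (Or.inr hc) ((y2 - y1).toNat)
              ((x2 - x1).toNat) x1 (by omega)]
        have L := loop_y_pos x2 y2 1 (x2 - x1) (y2 - y1) x2 (Or.inl rfl) 0 ((y2 - y1).toNat) y1 (by omega)
        rw [Nat.add_zero] at L
        rw [L, loop_zero]
        simp
      · -- x1 < x2, y1 = y2 : contradicts hc
        exfalso
        rw [abs_of_pos (show (0:Int) < x2 - x1 from by omega),
            abs_of_nonneg (show (0:Int) ≤ y2 - y1 from by omega)] at hc
        omega
      · -- x1 < x2, y2 < y1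
        rw [if_pos (show x2 - x1 > 0 from by omega),
            if_neg (show ¬ y2 - y1 > 0 from by omega),
            if_pos (show y2 - y1 < 0 from by omega),
            if_pos (show x2 > x1 from hx),
            if_neg (show ¬ y2 > y1 from by omega)]
        rw [abs_of_pos (show (0:Int) < x2 - x1 from by omega),
            abs_of_neg (show y2 - y1 < 0 from by omega)] at hc ⊢
        rw [show (x2 - x1 + -(y2 - y1)).toNat = (x2 - x1).toNat + (-(y2 - y1)).toNat from by omega]
        rw [loop_x_pos x2 y2 (-1) (x2 - x1) (-(y2 - y1)) y1 (Or.inr hc) ((-(y2 - y1)).toNat)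
              ((x2 - x1).toNat) x1 (by omega)]
        have L := loop_y_neg x2 y2 1 (x2 - x1) (-(y2 - y1)) x2 (Or.inl rfl) 0 ((-(y2 - y1)).toNat) y1 (by omega)
        rw [Nat.add_zero] at L
        rw [L, loop_zero]
        simp [sub_eq_add_neg]
    · -- x1 = x2
      subst hx
      rw [if_neg (show ¬ x1 - x1 > 0 from by omega),
          if_neg (show ¬ x1 - x1 < 0 from by omega),
          if_neg (show ¬ x1 > x1 from by omega)]
      rcases lt_trichotomy y1 y2 with hy | hy | hy
      · rw [if_pos (show y2 - y1 > 0 from by omega), if_pos (show y2 > y1 from hy)]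
        rw [show (|x1 - x1| + |y2 - y1|).toNat = (y2 - y1).toNat + 0 from by
              rw [show x1 - x1 = 0 from by omega, abs_zero,
                  abs_of_pos (show (0:Int) < y2 - y1 from by omega)]; omega]
        rw [loop_y_pos x1 y2 0 |x1 - x1| |y2 - y1| x1 (Or.inl rfl) 0 ((y2 - y1).toNat) y1 (by omega),
            loop_zero, PySem.List.pyRange_neg_one_eq_nil (show x1 + -1 ≤ x1 + -1 from le_refl _)]
        simp
      · rw [if_neg (show ¬ y2 - y1 > 0 from by omega),
            if_neg (show ¬ y2 - y1 < 0 from by omega),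
            if_neg (show ¬ y2 > y1 from by omega)]
        rw [show (|x1 - x1| + |y2 - y1|).toNat = 0 from by
              rw [show x1 - x1 = 0 from by omega, show y2 - y1 = 0 from by omega]; simp]
        rw [loop_zero,
            PySem.List.pyRange_neg_one_eq_nil (show x1 + -1 ≤ x1 + -1 from le_refl _),
            PySem.List.pyRange_neg_one_eq_nil (show y1 + -1 ≤ y2 + -1 from by omega)]
        simp
      · rw [if_neg (show ¬ y2 - y1 > 0 from by omega),
            if_pos (show y2 - y1 < 0 from by omega),
            if_neg (show ¬ y2 > y1 from by omega)]
        rw [show (|x1 - x1| + |y2 - y1|).toNat = (-(y2 - y1)).toNat + 0 from by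
              rw [show x1 - x1 = 0 from by omega, abs_zero,
                  abs_of_neg (show y2 - y1 < 0 from by omega)]; omega]
        rw [loop_y_neg x1 y2 0 |x1 - x1| |y2 - y1| x1 (Or.inl rfl) 0 ((-(y2 - y1)).toNat) y1 (by omega),
            loop_zero, PySem.List.pyRange_neg_one_eq_nil (show x1 + -1 ≤ x1 + -1 from le_refl _)]
        simp [sub_eq_add_neg]
    · -- x2 < x1
      rcases lt_trichotomy y1 y2 with hy | hy | hy
      · rw [if_neg (show ¬ x2 - x1 > 0 from by omega),
            if_pos (show x2 - x1 < 0 from by omega),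
            if_pos (show y2 - y1 > 0 from by omega),
            if_neg (show ¬ x2 > x1 from by omega),
            if_pos (show y2 > y1 from hy)]
        rw [abs_of_neg (show x2 - x1 < 0 from by omega),
            abs_of_pos (show (0:Int) < y2 - y1 from by omega)] at hc ⊢
        rw [show (-(x2 - x1) + (y2 - y1)).toNat = (-(x2 - x1)).toNat + (y2 - y1).toNat from by omega]
        rw [loop_x_neg x2 y2 1 (-(x2 - x1)) (y2 - y1) y1 (Or.inr hc) ((y2 - y1).toNat)
              ((-(x2 - x1)).toNat) x1 (by omega)]
        have L := loop_y_pos x2 y2 (-1) (-(x2 - x1)) (y2 - y1) x2 (Or.inl rfl) 0 ((y2 - y1).toNat) y1 (by omega)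
        rw [Nat.add_zero] at L
        rw [L, loop_zero]
        simp [sub_eq_add_neg]
      · exfalso
        rw [abs_of_neg (show x2 - x1 < 0 from by omega),
            abs_of_nonneg (show (0:Int) ≤ y2 - y1 from by omega)] at hc
        omega
      · rw [if_neg (show ¬ x2 - x1 > 0 from by omega),
            if_pos (show x2 - x1 < 0 from by omega),
            if_neg (show ¬ y2 - y1 > 0 from by omega),
            if_pos (show y2 - y1 < 0 from by omega),
            if_neg (show ¬ x2 > x1 from by omega),
            if_neg (show ¬ y2 > y1 from by omega)]
        rw [abs_of_neg (show x2 - x1 < 0 from by omega),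
            abs_of_neg (show y2 - y1 < 0 from by omega)] at hc ⊢
        rw [show (-(x2 - x1) + -(y2 - y1)).toNat = (-(x2 - x1)).toNat + (-(y2 - y1)).toNat from by omega]
        rw [loop_x_neg x2 y2 (-1) (-(x2 - x1)) (-(y2 - y1)) y1 (Or.inr hc) ((-(y2 - y1)).toNat)
              ((-(x2 - x1)).toNat) x1 (by omega)]
        have L := loop_y_neg x2 y2 (-1) (-(x2 - x1)) (-(y2 - y1)) x2 (Or.inl rfl) 0 ((-(y2 - y1)).toNat) y1 (by omega)
        rw [Nat.add_zero] at L
        rw [L, loop_zero]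
        simp [sub_eq_add_neg]
  · rw [if_neg hc]
    rcases lt_trichotomy x1 x2 with hx | hx | hx
    · rcases lt_trichotomy y1 y2 with hy | hy | hy
      · -- x1 < x2, y1 < y2, y first
        rw [if_pos (show x2 - x1 > 0 from by omega),
            if_pos (show y2 - y1 > 0 from by omega),
            if_pos (show x2 > x1 from hx),
            if_pos (show y2 > y1 from hy)]
        rw [abs_of_pos (show (0:Int) < x2 - x1 from by omega),
            abs_of_pos (show (0:Int) < y2 - y1 from by omega)] at hc ⊢
        rw [show (x2 - x1 + (y2 - y1)).toNat = (y2 - y1).toNat + (x2 - x1).toNat from by omega]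
        rw [loop_y_pos x2 y2 1 (x2 - x1) (y2 - y1) x1 (Or.inr hc) ((x2 - x1).toNat)
              ((y2 - y1).toNat) y1 (by omega)]
        have L := loop_x_pos x2 y2 1 (x2 - x1) (y2 - y1) y2 (Or.inl rfl) 0 ((x2 - x1).toNat) x1 (by omega)
        rw [Nat.add_zero] at L
        rw [L, loop_zero]
        simp
      · -- x1 < x2, y1 = y2
        subst hy
        rw [if_pos (show x2 - x1 > 0 from by omega),
            if_neg (show ¬ y1 - y1 > 0 from by omega),
            if_neg (show ¬ y1 - y1 < 0 from by omega),
            if_pos (show x2 > x1 from hx),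
            if_neg (show ¬ y1 > y1 from by omega)]
        rw [show (|x2 - x1| + |y1 - y1|).toNat = (x2 - x1).toNat + 0 from by
              rw [show y1 - y1 = 0 from by omega, abs_zero,
                  abs_of_pos (show (0:Int) < x2 - x1 from by omega)]; omega]
        rw [loop_x_pos x2 y1 0 |x2 - x1| |y1 - y1| y1 (Or.inl rfl) 0 ((x2 - x1).toNat) x1 (by omega),
            loop_zero, PySem.List.pyRange_neg_one_eq_nil (show y1 + -1 ≤ y1 + -1 from le_refl _)]
        simp
      · -- x1 < x2, y2 < y1
        rw [if_pos (show x2 - x1 > 0 from by omega),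
            if_neg (show ¬ y2 - y1 > 0 from by omega),
            if_pos (show y2 - y1 < 0 from by omega),
            if_pos (show x2 > x1 from hx),
            if_neg (show ¬ y2 > y1 from by omega)]
        rw [abs_of_pos (show (0:Int) < x2 - x1 from by omega),
            abs_of_neg (show y2 - y1 < 0 from by omega)] at hc ⊢
        rw [show (x2 - x1 + -(y2 - y1)).toNat = (-(y2 - y1)).toNat + (x2 - x1).toNat from by omega]
        rw [loop_y_neg x2 y2 1 (x2 - x1) (-(y2 - y1)) x1 (Or.inr hc) ((x2 - x1).toNat)
              ((-(y2 - y1)).toNat) y1 (by omega)]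
        have L := loop_x_pos x2 y2 (-1) (x2 - x1) (-(y2 - y1)) y2 (Or.inl rfl) 0 ((x2 - x1).toNat) x1 (by omega)
        rw [Nat.add_zero] at L
        rw [L, loop_zero]
        simp [sub_eq_add_neg]
    · -- x1 = x2 : contradicts ¬hc
      exfalso
      exact hc (by rw [show x2 - x1 = 0 from by omega]; simp [abs_nonneg])
    · rcases lt_trichotomy y1 y2 with hy | hy | hy
      · rw [if_neg (show ¬ x2 - x1 > 0 from by omega),
            if_pos (show x2 - x1 < 0 from by omega),
            if_pos (show y2 - y1 > 0 from by omega),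
            if_neg (show ¬ x2 > x1 from by omega),
            if_pos (show y2 > y1 from hy)]
        rw [abs_of_neg (show x2 - x1 < 0 from by omega),
            abs_of_pos (show (0:Int) < y2 - y1 from by omega)] at hc ⊢
        rw [show (-(x2 - x1) + (y2 - y1)).toNat = (y2 - y1).toNat + (-(x2 - x1)).toNat from by omega]
        rw [loop_y_pos x2 y2 (-1) (-(x2 - x1)) (y2 - y1) x1 (Or.inr hc) ((-(x2 - x1)).toNat)
              ((y2 - y1).toNat) y1 (by omega)]
        have L := loop_x_neg x2 y2 1 (-(x2 - x1)) (y2 - y1) y2 (Or.inl rfl) 0 ((-(x2 - x1)).toNat) x1 (by omega)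
        rw [Nat.add_zero] at L
        rw [L, loop_zero]
        simp [sub_eq_add_neg]
      · subst hy
        rw [if_neg (show ¬ x2 - x1 > 0 from by omega),
            if_pos (show x2 - x1 < 0 from by omega),
            if_neg (show ¬ y1 - y1 > 0 from by omega),
            if_neg (show ¬ y1 - y1 < 0 from by omega),
            if_neg (show ¬ x2 > x1 from by omega),
            if_neg (show ¬ y1 > y1 from by omega)]
        rw [show (|x2 - x1| + |y1 - y1|).toNat = (-(x2 - x1)).toNat + 0 from by
              rw [show y1 - y1 = 0 from by omega, abs_zero,
                  abs_of_neg (show x2 - x1 < 0 from by omega)]; omega]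
        rw [loop_x_neg x2 y1 0 |x2 - x1| |y1 - y1| y1 (Or.inl rfl) 0 ((-(x2 - x1)).toNat) x1 (by omega),
            loop_zero, PySem.List.pyRange_neg_one_eq_nil (show y1 + -1 ≤ y1 + -1 from le_refl _)]
        simp [sub_eq_add_neg]
      · rw [if_neg (show ¬ x2 - x1 > 0 from by omega),
            if_pos (show x2 - x1 < 0 from by omega),
            if_neg (show ¬ y2 - y1 > 0 from by omega),
            if_pos (show y2 - y1 < 0 from by omega),
            if_neg (show ¬ x2 > x1 from by omega),
            if_neg (show ¬ y2 > y1 from by omega)]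
        rw [abs_of_neg (show x2 - x1 < 0 from by omega),
            abs_of_neg (show y2 - y1 < 0 from by omega)] at hc ⊢
        rw [show (-(x2 - x1) + -(y2 - y1)).toNat = (-(y2 - y1)).toNat + (-(x2 - x1)).toNat from by omega]
        rw [loop_y_neg x2 y2 (-1) (-(x2 - x1)) (-(y2 - y1)) x1 (Or.inr hc) ((-(x2 - x1)).toNat)
              ((-(y2 - y1)).toNat) y1 (by omega)]
        have L := loop_x_neg x2 y2 (-1) (-(x2 - x1)) (-(y2 - y1)) y2 (Or.inl rfl) 0 ((-(x2 - x1)).toNat) x1 (by omega)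
        rw [Nat.add_zero] at L
        rw [L, loop_zero]
        simp [sub_eq_add_neg]
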